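-- pv_equiv track=rewrite | github.com/kaprakash90/Python | tictac_single.py | get_closest_available
-- ===== SOURCE A (Python) =====
-- def get_closest_available(board, player_mark,freecells):
--     j=0
--     closeav = []
--     for i in board:
--         if i == player_mark:
--             if j==1:
--                 closeav += [2,4,5]
--             elif j==2:
--                 closeav += [1,3,5]
--             elif j==3:
--                 closeav += [2,5,6]
--             elif j==4:
--                 closeav += [1,5,7]
--             elif j==5:
--                 closeav += [1,2,3,4,6,7,8,9]
--             elif j==6:
--                 closeav += [9,3,5]
--             elif j==7:
--                 closeav += [4,5,8]
--             elif j==8: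
--                 closeav += [7,5,9]
--             elif j==9:
--                 closeav += [8,5,6]
--         j +=1
--     if len(freecells) > len(closeav):
--         return list(set(freecells).intersection(set(closeav)))
--     else:
--         return list(set(closeav).intersection(set(freecells)))
-- ===== SOURCE B (Python) =====
-- NEIGHBORS = {
--     1: [2, 4, 5],
--     2: [1, 3, 5],
--     3: [2, 5, 6],
--     4: [1, 5, 7],
--     5: [1, 2, 3, 4, 6, 7, 8, 9],
--     6: [9, 3, 5],
--     7: [4, 5, 8],
--     8: [7, 5, 9],
--     9: [8, 5, 6],
-- }
--
--
-- def get_closest_available(board, player_mark, freecells):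
--     marked = {j for j, c in enumerate(board) if c == player_mark}
--     result = {c for c in freecells
--               if any(c in NEIGHBORS.get(p, []) for p in marked)}
--     return list(result)
-- ===== Notes on version B (the rewrite author's own statement) =====
-- stated objective: simpler
-- what changed: B replaces A's build-candidate-list-then-intersect (with a length-guarded branch choosing the intersection direction) by a direct filter: a neighbor table keyed 1..9, the set of marked positions, and one pass keeping each freecell adjacent to some marked position.
import Mathlib
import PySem

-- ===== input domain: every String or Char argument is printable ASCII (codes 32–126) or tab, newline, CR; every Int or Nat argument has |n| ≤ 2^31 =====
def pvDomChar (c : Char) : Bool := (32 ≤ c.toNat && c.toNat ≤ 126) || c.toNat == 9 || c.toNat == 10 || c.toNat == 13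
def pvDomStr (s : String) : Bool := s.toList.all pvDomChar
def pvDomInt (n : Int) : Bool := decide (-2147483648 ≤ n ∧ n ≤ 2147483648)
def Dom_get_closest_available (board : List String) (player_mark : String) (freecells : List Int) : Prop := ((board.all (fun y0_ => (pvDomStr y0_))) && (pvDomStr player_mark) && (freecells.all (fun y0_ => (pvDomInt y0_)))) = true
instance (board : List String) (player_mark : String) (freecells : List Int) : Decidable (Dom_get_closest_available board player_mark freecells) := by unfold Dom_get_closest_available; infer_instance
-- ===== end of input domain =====

-- B replaces A's build-candidate-list-then-intersect by a direct filter of freecells against a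
-- neighbor table and the set of marked positions (simpler decomposition; no speed claim).
-- Both functions end in Python's `list(set(...))`, whose hash iteration order PySem does not model
-- and which the task compares as a SET; both ports render that final set in increasing order
-- (PySem.List.sorted, no key) — an order-insensitive consumption applied identically to both sides.

-- ===== PORT A =====
-- A's elif chain: the cells appended for marked position j (nothing for j = 0 or j > 9).
def pvNbrA (j : Int) : List Int :=
  if j == 1 then [2, 4, 5]
  else if j == 2 then [1, 3, 5]
  else if j == 3 then [2, 5, 6]
  else if j == 4 then [1, 5, 7]
  else if j == 5 then [1, 2, 3, 4, 6, 7, 8, 9]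
  else if j == 6 then [9, 3, 5]
  else if j == 7 then [4, 5, 8]
  else if j == 8 then [7, 5, 9]
  else if j == 9 then [8, 5, 6]
  else []

def get_closest_available (board : List String) (player_mark : String) (freecells : List Int) : List Int :=
  let st := board.foldl
    (fun (st : Int × List Int) (i : String) =>
      let closeav := if i == player_mark then st.2 ++ pvNbrA st.1 else st.2
      (st.1 + 1, closeav))
    (0, [])
  let closeav := st.2
  if (freecells.length : Int) > (closeav.length : Int) then
    PySem.List.sorted (PySem.Set.inter (PySem.Set.ofList freecells) (PySem.Set.ofList closeav)) (fun x => x) false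
  else
    PySem.List.sorted (PySem.Set.inter (PySem.Set.ofList closeav) (PySem.Set.ofList freecells)) (fun x => x) false

-- ===== PORT B =====
def pvNEIGHBORS : PySem.Dict Int (List Int) :=
  PySem.Dict.mk
    [(1, [2, 4, 5]), (2, [1, 3, 5]), (3, [2, 5, 6]), (4, [1, 5, 7]),
     (5, [1, 2, 3, 4, 6, 7, 8, 9]), (6, [9, 3, 5]), (7, [4, 5, 8]),
     (8, [7, 5, 9]), (9, [8, 5, 6])]

def get_closest_available_alt (board : List String) (player_mark : String) (freecells : List Int) : List Int :=
  let marked : PySem.Set Int :=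
    PySem.Set.ofList (((PySem.List.enumerate board 0).filter (fun p => p.2 == player_mark)).map (fun p => p.1))
  let result : PySem.Set Int :=
    PySem.Set.ofList (freecells.filter
      (fun c => marked.any (fun p => (PySem.Dict.getD pvNEIGHBORS p []).contains c)))
  PySem.List.sorted result (fun x => x) false

-- ===== PRECONDITION & SPEC =====
def Spec_get_closest_available (board : List String) (player_mark : String) (freecells : List Int) (out : List Int) : Prop := out = get_closest_available_alt board player_mark freecells
instance (board : List String) (player_mark : String) (freecells : List Int) (out : List Int) : Decidable (Spec_get_closest_available board player_mark freecells out) := by unfold Spec_get_closest_available; infer_instance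

-- ===== CLAIM (what is proved, stated in full; the proofs are below) =====
def Claim_equal_get_closest_available : Prop := ∀ (board : List String) (player_mark : String) (freecells : List Int), Dom_get_closest_available board player_mark freecells → Spec_get_closest_available board player_mark freecells (get_closest_available board player_mark freecells)

-- ===== LEMMAS AND PROOFS =====

-- The neighbor table of B agrees pointwise with A's elif chain.
theorem pvNbrA_eq_getD (j : Int) : pvNbrA j = PySem.Dict.getD pvNEIGHBORS j [] := by
  simp only [pvNbrA, pvNEIGHBORS, PySem.Dict.getD, PySem.Dict.get?, beq_iff_eq]
  rcases eq_or_ne j 1 with h1 | h1; · simp [h1]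
  rcases eq_or_ne j 2 with h2 | h2; · simp [h2]
  rcases eq_or_ne j 3 with h3 | h3; · simp [h3]
  rcases eq_or_ne j 4 with h4 | h4; · simp [h4]
  rcases eq_or_ne j 5 with h5 | h5; · simp [h5]
  rcases eq_or_ne j 6 with h6 | h6; · simp [h6]
  rcases eq_or_ne j 7 with h7 | h7; · simp [h7]
  rcases eq_or_ne j 8 with h8 | h8; · simp [h8]
  rcases eq_or_ne j 9 with h9 | h9; · simp [h9]
  simp [h1, h2, h3, h4, h5, h6, h7, h8, h9, Ne.symm h1, Ne.symm h2, Ne.symm h3, Ne.symm h4,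
    Ne.symm h5, Ne.symm h6, Ne.symm h7, Ne.symm h8, Ne.symm h9]

-- A's counting loop, characterised: the accumulated closeav is acc ++ the neighbors of every
-- marked position, in enumeration order.
theorem pvFoldA_char (player_mark : String) (bd : List String) (j : Int) (acc : List Int) :
    (bd.foldl
      (fun (st : Int × List Int) (i : String) =>
        let closeav := if i == player_mark then st.2 ++ pvNbrA st.1 else st.2
        (st.1 + 1, closeav))
      (j, acc)).2
    = acc ++ (PySem.List.enumerate bd j).flatMap
        (fun p => if p.2 == player_mark then pvNbrA p.1 else []) := by
  induction bd generalizing j acc with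
  | nil => simp [PySem.List.enumerate_nil]
  | cons x xs ih =>
    simp only [List.foldl_cons, PySem.List.enumerate_cons, List.flatMap_cons]
    rw [ih]
    by_cases h : (x == player_mark) = true <;> simp [h]

-- Both sides select the same cells: c is appended by some marked position of A's loop
-- iff some marked position has c in B's neighbor table.
theorem pv_mem_iff (player_mark : String) (board : List String) (c : Int) :
    ((PySem.Set.ofList (((PySem.List.enumerate board 0).filter (fun p => p.2 == player_mark)).map (fun p => p.1))).any
        (fun p => (PySem.Dict.getD pvNEIGHBORS p []).contains c)) = true
    ↔ c ∈ (PySem.List.enumerate board 0).flatMap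
        (fun p => if p.2 == player_mark then pvNbrA p.1 else []) := by
  simp [List.any_eq_true, PySem.Set.mem_ofList, List.mem_map, List.mem_filter,
    List.mem_flatMap, ← pvNbrA_eq_getD]

theorem get_closest_available_spec : Claim_equal_get_closest_available := by
  intro board player_mark freecells _
  unfold Spec_get_closest_available
  unfold get_closest_available get_closest_available_alt
  simp only
  rw [pvFoldA_char]
  simp only [List.nil_append]
  set L := (PySem.List.enumerate board 0).flatMap
      (fun p => if p.2 == player_mark then pvNbrA p.1 else []) with hL
  set F := freecells.filter
      (fun c => (PySem.Set.ofList (((PySem.List.enumerate board 0).filter (fun p => p.2 == player_mark)).map (fun p => p.1))).any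
        (fun p => (PySem.Dict.getD pvNEIGHBORS p []).contains c)) with hF
  have hmem : ∀ x : Int, x ∈ PySem.Set.ofList F ↔ x ∈ freecells ∧ x ∈ L := by
    intro x
    simp only [PySem.Set.mem_ofList, hF, List.mem_filter]
    constructor
    · rintro ⟨hx, ha⟩; exact ⟨hx, (pv_mem_iff player_mark board x).mp ha⟩
    · rintro ⟨hx, ha⟩; exact ⟨hx, (pv_mem_iff player_mark board x).mpr ha⟩
  split_ifs with h
  · exact PySem.List.sorted_eq_sorted_of_perm _ _ _ (fun a b hab => hab)
      ((List.perm_ext_iff_of_nodup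
        (PySem.Set.nodup_inter _ _ (PySem.Set.nodup_ofList freecells))
        (PySem.Set.nodup_ofList F)).mpr (fun x => by
          rw [PySem.Set.mem_inter, PySem.Set.mem_ofList, PySem.Set.mem_ofList, hmem]))
  · exact PySem.List.sorted_eq_sorted_of_perm _ _ _ (fun a b hab => hab)
      ((List.perm_ext_iff_of_nodup
        (PySem.Set.nodup_inter _ _ (PySem.Set.nodup_ofList L))
        (PySem.Set.nodup_ofList F)).mpr (fun x => by
          rw [PySem.Set.mem_inter, PySem.Set.mem_ofList, PySem.Set.mem_ofList, hmem, and_comm]))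

-- ===== VERDICT (by name: the statement is the Claim_ definition above) =====
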